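-- pv_equiv track=rewrite | github.com/ubercareerprep2021/Uber-Career-Prep-Homework-Jacqueline-Tapia | Assignment1/Part2.py | isStringPermutation
-- ===== SOURCE A (Python) =====
-- def isStringPermutation(s1,s2):
--     if len(s1) != len(s2):
--         return False
--     s1Map = {}
--     for i in s1:
--         if i in s1Map:
--             s1Map[i] += 1
--         else:
--             s1Map[i] = 1
--
--     for i in s2:
--         if i in s1Map and s1Map[i] > 0:
--             s1Map[i] -= 1
--         elif i in s1Map and s1Map[i] == 0:
--             return False
--         else:
--             return False
--     return True
-- ===== SOURCE B (Python) =====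
-- def isStringPermutation(s1, s2):
--     return sorted(s1) == sorted(s2)
-- ===== Notes on version B (the rewrite author's own statement) =====
-- stated objective: simpler
-- what changed: Replaced the hash-map counting pass plus decrement/early-return pass with a single sort-and-compare expression.
import Mathlib
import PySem

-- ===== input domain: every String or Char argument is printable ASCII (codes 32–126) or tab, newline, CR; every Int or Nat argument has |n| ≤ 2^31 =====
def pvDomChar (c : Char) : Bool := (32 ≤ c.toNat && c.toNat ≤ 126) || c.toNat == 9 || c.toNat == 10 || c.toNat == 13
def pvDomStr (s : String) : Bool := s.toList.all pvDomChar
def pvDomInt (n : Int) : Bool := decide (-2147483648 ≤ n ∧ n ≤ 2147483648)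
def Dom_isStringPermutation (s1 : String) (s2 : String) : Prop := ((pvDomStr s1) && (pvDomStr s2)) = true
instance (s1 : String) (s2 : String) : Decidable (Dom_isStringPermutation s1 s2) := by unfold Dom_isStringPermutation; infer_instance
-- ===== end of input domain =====

-- B replaces A's count-map build + decrement pass with a single sort-and-compare expression (simpler; no speed claim).


-- ===== PORT A =====
-- first loop of A: build the character-count dict over s1
def pvBuildMap (l : List Char) : PySem.Dict Char Int :=
  l.foldl (fun d i => if d.contains i then d.modify i 0 (· + 1) else d.insert i 1) PySem.Dict.empty

-- second loop of A, with its three branches and early returns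
def pvLoop2 (d : PySem.Dict Char Int) : List Char → Bool
  | [] => true
  | i :: rest =>
    if d.contains i && decide (d.getD i 0 > 0) then pvLoop2 (d.modify i 0 (· - 1)) rest
    else if d.contains i && decide (d.getD i 0 = 0) then false
    else false

def isStringPermutation (s1 : String) (s2 : String) : Bool :=
  if PySem.Str.len s1 ≠ PySem.Str.len s2 then false
  else pvLoop2 (pvBuildMap s1.toList) s2.toList

-- ===== PORT B =====
def isStringPermutation_alt (s1 : String) (s2 : String) : Bool :=
  PySem.List.sorted s1.toList (fun x => x) false == PySem.List.sorted s2.toList (fun x => x) false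

-- ===== PRECONDITION & SPEC =====
def Spec_isStringPermutation (s1 : String) (s2 : String) (out : Bool) : Prop := out = isStringPermutation_alt s1 s2
instance (s1 : String) (s2 : String) (out : Bool) : Decidable (Spec_isStringPermutation s1 s2 out) := by unfold Spec_isStringPermutation; infer_instance

-- ===== CLAIM (what is proved, stated in full; the proofs are below) =====
def Claim_equal_isStringPermutation : Prop := ∀ (s1 : String) (s2 : String), Dom_isStringPermutation s1 s2 → Spec_isStringPermutation s1 s2 (isStringPermutation s1 s2)

-- ===== LEMMAS AND PROOFS =====

theorem getD_buildMapAux (l : List Char) (d : PySem.Dict Char Int) (c : Char) :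
    (l.foldl (fun d i => if d.contains i then d.modify i 0 (· + 1) else d.insert i 1) d).getD c 0
      = d.getD c 0 + l.count c := by
  induction l generalizing d with
  | nil => simp
  | cons i rest ih =>
    simp only [List.foldl_cons, List.count_cons, ih]
    by_cases hc : d.contains i = true
    · rw [if_pos hc, PySem.Dict.getD_modify]
      by_cases h : c = i
      · subst h
        simp only [beq_self_eq_true, if_true]
        push_cast
        ring
      · have hbe : (i == c) = false := by
          rw [beq_eq_false_iff_ne]
          exact Ne.symm h
        simp only [if_neg h, hbe, Bool.false_eq_true, if_false]
        push_cast
        ring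
    · rw [if_neg hc, PySem.Dict.getD_insert]
      have hd0 : d.getD i 0 = 0 := PySem.Dict.getD_of_not_contains d 0 (by simpa using hc)
      by_cases h : c = i
      · subst h
        simp only [beq_self_eq_true, if_true, hd0]
        push_cast
        ring
      · have hbe : (i == c) = false := by
          rw [beq_eq_false_iff_ne]
          exact Ne.symm h
        simp only [if_neg h, hbe, Bool.false_eq_true, if_false]
        push_cast
        ring

theorem contains_buildMapAux (l : List Char) (d : PySem.Dict Char Int) (c : Char) :
    (l.foldl (fun d i => if d.contains i then d.modify i 0 (· + 1) else d.insert i 1) d).contains c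
      = (d.contains c || l.contains c) := by
  induction l generalizing d with
  | nil => simp
  | cons i rest ih =>
    simp only [List.foldl_cons, ih]
    by_cases h : c = i
    · by_cases hc : d.contains i = true
      · simp [h, hc, PySem.Dict.contains_modify]
      · simp [h, hc]
    · have hbe : (c == i) = false := by simp [h]
      by_cases hc : d.contains i = true <;>
        simp [hc, hbe, h, PySem.Dict.contains_modify, PySem.Dict.contains_insert]

theorem loop2_iff (l : List Char) (d : PySem.Dict Char Int) (cnt : Char → Int)
    (h1 : ∀ c, d.contains c = true → d.getD c 0 = cnt c)
    (h2 : ∀ c, d.contains c = false → cnt c = 0)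
    (h3 : ∀ c, 0 ≤ cnt c) :
    (pvLoop2 d l = true ↔ ∀ c, (l.count c : Int) ≤ cnt c) := by
  induction l generalizing d cnt with
  | nil => simpa [pvLoop2] using fun c => by simpa using h3 c
  | cons i rest ih =>
    by_cases hc : d.contains i = true
    · by_cases hv : 0 < d.getD i 0
      · have hcnt : d.getD i 0 = cnt i := h1 i hc
        have step : pvLoop2 d (i :: rest) = pvLoop2 (d.modify i 0 (· - 1)) rest := by
          simp [pvLoop2, hc, hv]
        rw [step, ih (d.modify i 0 (· - 1)) (fun c => if c = i then cnt i - 1 else cnt c)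
          (by
            intro c hcon
            rw [PySem.Dict.getD_modify]
            by_cases h : c = i
            · simp [h, hcnt]
            · have hc2 : d.contains c = true := by
                have := PySem.Dict.contains_modify d i c 0 (· - 1)
                rw [hcon] at this
                have hbe : (c == i) = false := by simp [h]
                simpa [hbe] using this.symm
              simp [h, h1 c hc2])
          (by
            intro c hcon
            have := PySem.Dict.contains_modify d i c 0 (· - 1)
            rw [hcon] at this
            show (if c = i then cnt i - 1 else cnt c) = 0
            by_cases h : c = i
            · rw [if_pos h]
              have hbe : (c == i) = true := by simp [h]
              rw [hbe] at this; simp at this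
            · rw [if_neg h]
              have hbe : (c == i) = false := by simp [h]
              rw [hbe] at this; simp at this
              exact h2 c this)
          (by
            intro c
            show 0 ≤ (if c = i then cnt i - 1 else cnt c)
            by_cases h : c = i
            · have := h3 i
              simp only [h, if_pos]
              omega
            · simp only [if_neg h]; exact h3 c)]
        constructor
        · intro hall c
          have hthis : (List.count c rest : Int) ≤ (if c = i then cnt i - 1 else cnt c) := hall c
          by_cases h : c = i
          · rw [if_pos h] at hthis
            rw [h, List.count_cons_self]
            rw [h] at hthis
            push_cast at hthis ⊢
            omega
          · rw [if_neg h] at hthis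
            rw [List.count_cons_of_ne (Ne.symm h)]
            exact hthis
        · intro hall c
          show (List.count c rest : Int) ≤ (if c = i then cnt i - 1 else cnt c)
          have hthis := hall c
          by_cases h : c = i
          · rw [if_pos h]
            rw [h, List.count_cons_self] at hthis
            rw [h]
            push_cast at hthis ⊢
            omega
          · rw [if_neg h]
            rw [List.count_cons_of_ne (Ne.symm h)] at hthis
            exact hthis
      · have hcnt : cnt i = 0 := by
          have ha := h1 i hc
          have hb := h3 i
          omega
        have hb : decide (d.getD i 0 > 0) = false := by
          simp
          omega
        have step : pvLoop2 d (i :: rest) = false := by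
          simp only [pvLoop2, hb, Bool.and_false, Bool.false_eq_true, if_false]
          split <;> rfl
        rw [step]
        simp only [Bool.false_eq_true, false_iff, not_forall]
        refine ⟨i, ?_⟩
        rw [List.count_cons_self, hcnt]
        push_cast
        omega
    · have hcnt : cnt i = 0 := h2 i (by simpa using hc)
      have step : pvLoop2 d (i :: rest) = false := by simp [pvLoop2, hc]
      rw [step]
      simp only [Bool.false_eq_true, false_iff, not_forall]
      refine ⟨i, ?_⟩
      rw [List.count_cons_self, hcnt]
      push_cast
      omega

theorem portA_iff_perm (s1 s2 : String) :
    isStringPermutation s1 s2 = true ↔ s2.toList.Perm s1.toList := by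
  unfold isStringPermutation
  by_cases hlen : PySem.Str.len s1 = PySem.Str.len s2
  · have hlen' : s1.toList.length = s2.toList.length := by
      simpa [PySem.Str.len] using hlen
    rw [if_neg (by simpa using hlen)]
    rw [loop2_iff s2.toList (pvBuildMap s1.toList) (fun c => (s1.toList.count c : Int))
      (by
        intro c _
        show (pvBuildMap s1.toList).getD c 0 = (s1.toList.count c : Int)
        rw [pvBuildMap, getD_buildMapAux]
        simp)
      (by
        intro c hcon
        rw [pvBuildMap, contains_buildMapAux] at hcon
        simp at hcon
        simp [List.count_eq_zero.mpr hcon])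
      (by intro c; positivity)]
    constructor
    · intro hall
      have hsub : s2.toList.Subperm s1.toList := by
        rw [List.subperm_ext_iff]
        intro x _
        exact_mod_cast hall x
      exact hsub.perm_of_length_le (le_of_eq hlen')
    · intro hperm c
      exact_mod_cast le_of_eq (hperm.count_eq c)
  · rw [if_pos (by simpa using hlen)]
    simp only [Bool.false_eq_true, false_iff]
    intro hperm
    exact hlen (by
      have := hperm.length_eq
      simp only [PySem.Str.len]
      omega)

theorem portB_iff_perm (s1 s2 : String) :
    isStringPermutation_alt s1 s2 = true ↔ s2.toList.Perm s1.toList := by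
  unfold isStringPermutation_alt
  rw [beq_iff_eq, PySem.List.sorted_id_eq_sorted_id_iff_perm]
  exact ⟨List.Perm.symm, List.Perm.symm⟩

-- ===== VERDICT (by name: the statement is the Claim_ definition above) =====
theorem isStringPermutation_spec : Claim_equal_isStringPermutation := by
  intro s1 s2 _
  unfold Spec_isStringPermutation
  have hiff := (portA_iff_perm s1 s2).trans (portB_iff_perm s1 s2).symm
  by_cases h : isStringPermutation s1 s2 = true
  · rw [h, (hiff.mp h).symm]
  · have h2 : ¬ isStringPermutation_alt s1 s2 = true := fun hb => h (hiff.mpr hb)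
    rw [Bool.not_eq_true] at h h2
    rw [h, h2]
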